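-- pv_equiv track=rewrite | github.com/aarelaponin/gam_utilities | joget_utility/processors/data_augmentor.py | _detect_primary_key
-- ===== SOURCE A (Python) =====
-- from typing import Dict, List, Any, Optional, Tuple
--
-- def _detect_primary_key(columns: List[str], records: List[Dict]) -> str:
--     """
--     Detect primary key column.
--
--     Rules (in priority order):
--     1. Column named 'id' or 'code'
--     2. Column ending with '_id' or '_code'
--     3. First column with unique values
--     4. First column as fallback
--     """
--     # Rule 1: exact match
--     for col in ['id', 'code']:
--         if col in columns:
--             return col
--
--     # Rule 2: suffix match
--     for col in columns:
--         if col.endswith('_id') or col.endswith('_code'):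
--             return col
--
--     # Rule 3: check uniqueness
--     for col in columns:
--         values = [r.get(col) for r in records]
--         if len(values) == len(set(values)):
--             return col
--
--     # Rule 4: fallback
--     return columns[0] if columns else 'id'
-- ===== SOURCE B (Python) =====
-- def _detect_primary_key(columns, records):
--     # One pass over columns collecting candidates, resolved by priority afterwards.
--     has_id = has_code = False
--     first_suffix = first_unique = None
--     for col in columns:
--         if col == 'id':
--             has_id = True
--         if col == 'code':
--             has_code = True
--         if first_suffix is None and (col.endswith('_id') or col.endswith('_code')):
--             first_suffix = col
--         if first_unique is None:
--             values = [r.get(col) for r in records]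
--             if len(values) == len(set(values)):
--                 first_unique = col
--     if has_id:
--         return 'id'
--     if has_code:
--         return 'code'
--     if first_suffix is not None:
--         return first_suffix
--     if first_unique is not None:
--         return first_unique
--     return columns[0] if columns else 'id'
-- ===== Notes on version B (the rewrite author's own statement) =====
-- stated objective: alternative
-- what changed: Replaces A's three sequential early-return scans over columns by a single candidate-collecting pass (id/code flags, first suffix match, first unique column) resolved by priority after the loop.
import Mathlib
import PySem

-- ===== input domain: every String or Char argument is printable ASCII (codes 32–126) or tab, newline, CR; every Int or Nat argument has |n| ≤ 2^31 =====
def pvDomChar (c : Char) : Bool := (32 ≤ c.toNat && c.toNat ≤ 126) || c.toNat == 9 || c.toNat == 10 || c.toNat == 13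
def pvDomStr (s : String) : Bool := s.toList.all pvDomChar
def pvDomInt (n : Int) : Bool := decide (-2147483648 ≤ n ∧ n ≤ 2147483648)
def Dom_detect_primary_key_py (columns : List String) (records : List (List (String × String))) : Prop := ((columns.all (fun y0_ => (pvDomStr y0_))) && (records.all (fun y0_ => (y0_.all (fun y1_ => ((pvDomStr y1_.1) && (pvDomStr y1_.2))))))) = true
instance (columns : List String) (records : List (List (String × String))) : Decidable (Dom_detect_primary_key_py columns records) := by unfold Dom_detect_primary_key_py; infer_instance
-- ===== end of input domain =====

-- B restructures A's three sequential early-return scans into one candidate-collecting pass; same results.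

-- ===== PORT A =====
-- r.get(col): first-match lookup in the association list (Python dict.get, None when absent)
def pvDictGet (r : List (String × String)) (col : String) : Option String :=
  (r.find? (fun kv => kv.1 == col)).map (·.2)

-- len(values) == len(set(values)) for values = [r.get(col) for r in records]
def pvUniqueCol (records : List (List (String × String))) (col : String) : Bool :=
  let values := records.map (fun r => pvDictGet r col)
  values.length == (PySem.Set.ofList values).length

def pvSuffixP (col : String) : Bool :=
  PySem.Str.endswith col "_id" || PySem.Str.endswith col "_code"

-- Rule 1 loop: for col in ['id','code']: if col in columns: return col
def pvRule1 (cands : List String) (columns : List String) : Option String :=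
  match cands with
  | [] => none
  | c :: rest => if columns.contains c then some c else pvRule1 rest columns

-- Rules 2/3 loops: first column satisfying p, else continue
def pvScan (p : String → Bool) : List String → Option String
  | [] => none
  | c :: rest => if p c then some c else pvScan p rest

def detect_primary_key_py (columns : List String) (records : List (List (String × String))) : String :=
  match pvRule1 ["id", "code"] columns with
  | some c => c
  | none =>
    match pvScan pvSuffixP columns with
    | some c => c
    | none =>
      match pvScan (pvUniqueCol records) columns with
      | some c => c
      | none => match columns with | [] => "id" | c :: _ => c

-- ===== PORT B =====
-- loop body of B: update (has_id, has_code, first_suffix, first_unique)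
def pvStep (records : List (List (String × String)))
    (st : Bool × Bool × Option String × Option String) (col : String) :
    Bool × Bool × Option String × Option String :=
  ( st.1 || col == "id",
    st.2.1 || col == "code",
    (match st.2.2.1 with
     | some c => some c
     | none => if pvSuffixP col then some col else none),
    (match st.2.2.2 with
     | some c => some c
     | none => if pvUniqueCol records col then some col else none) )

def detect_primary_key_py_alt (columns : List String) (records : List (List (String × String))) : String :=
  let st := columns.foldl (pvStep records) (false, false, none, none)
  if st.1 then "id"
  else if st.2.1 then "code"
  else
    match st.2.2.1 with
    | some c => c
    | none =>
      match st.2.2.2 with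
      | some c => c
      | none => match columns with | [] => "id" | c :: _ => c

-- ===== PRECONDITION & SPEC =====
def Spec_detect_primary_key_py (columns : List String) (records : List (List (String × String))) (out : String) : Prop := out = detect_primary_key_py_alt columns records
instance (columns : List String) (records : List (List (String × String))) (out : String) : Decidable (Spec_detect_primary_key_py columns records out) := by unfold Spec_detect_primary_key_py; infer_instance

-- ===== CLAIM (what is proved, stated in full; the proofs are below) =====
def Claim_equal_detect_primary_key_py : Prop := ∀ (columns : List String) (records : List (List (String × String))), Dom_detect_primary_key_py columns records → Spec_detect_primary_key_py columns records (detect_primary_key_py columns records)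

-- ===== LEMMAS AND PROOFS =====

-- characterisation of B's fold: flags become contains, option slots become first-match scans
theorem pvFold_char (records : List (List (String × String))) (cols : List String)
    (b1 b2 : Bool) (o1 o2 : Option String) :
    cols.foldl (pvStep records) (b1, b2, o1, o2) =
      ( b1 || cols.contains "id",
        b2 || cols.contains "code",
        (match o1 with | some c => some c | none => pvScan pvSuffixP cols),
        (match o2 with | some c => some c | none => pvScan (pvUniqueCol records) cols) ) := by
  induction cols generalizing b1 b2 o1 o2 with
  | nil => cases o1 <;> cases o2 <;> simp [List.foldl, pvScan]
  | cons c rest ih =>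
    simp only [List.foldl, List.contains_cons]
    rw [ih]
    cases o1 <;> cases o2 <;>
      simp [pvStep, pvScan, Bool.or_assoc, BEq.comm] <;>
      split_ifs <;>
      simp_all

theorem detect_equal (columns : List String) (records : List (List (String × String))) :
    detect_primary_key_py columns records = detect_primary_key_py_alt columns records := by
  unfold detect_primary_key_py detect_primary_key_py_alt
  rw [pvFold_char]
  simp only [pvRule1, Bool.false_or]
  by_cases hid : "id" ∈ columns <;>
    by_cases hcode : "code" ∈ columns <;>
      simp [hid, hcode]

-- ===== VERDICT (by name: the statement is the Claim_ definition above) =====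
theorem detect_primary_key_py_spec : Claim_equal_detect_primary_key_py := by
  intro columns records _
  unfold Spec_detect_primary_key_py
  exact detect_equal columns records
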